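-- pv_equiv track=rewrite | github.com/gmelfe/AoC24 | day04/solution.py | count_diagonally
-- ===== SOURCE A (Python) =====
-- def count_diagonally(word_search, sequence):
--     # WARNING: sequence length hardcoded to 4
--     rows = len(word_search)
--     cols = len(word_search[0])
--     count = 0
--
--     # Check forward diagonals
--     for i in range(rows - 3):
--         for j in range(cols - 3):
--             if (
--                 "".join(
--                     [
--                         word_search[i][j],
--                         word_search[i + 1][j + 1],
--                         word_search[i + 2][j + 2],
--                         word_search[i + 3][j + 3],
--                     ]
--                 )
--                 == sequence
--             ):
--                 count += 1
--
--     # Check backward diagonals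
--     for i in range(rows - 3):
--         for j in range(3, cols):
--             if (
--                 "".join(
--                     [
--                         word_search[i][j],
--                         word_search[i + 1][j - 1],
--                         word_search[i + 2][j - 2],
--                         word_search[i + 3][j - 3],
--                     ]
--                 )
--                 == sequence
--             ):
--                 count += 1
--
--     return count
-- ===== SOURCE B (Python) =====
-- def count_diagonally(word_search, sequence):
--     # WARNING: sequence length hardcoded to 4 (only 4-char windows are compared)
--     rows = len(word_search)
--     cols = len(word_search[0])
--     if rows < 4 or cols < 4:
--         return 0  # no 4-character diagonal window fits
--
--     # Collect every diagonal as a string, then count 4-char windows equal to sequence.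
--     diagonals = []
--     # down-right diagonals (constant j - i), starting on the top row ...
--     for j in range(cols):
--         diagonals.append("".join(word_search[p][j + p] for p in range(min(rows, cols - j))))
--     # ... and on the left column (below the corner)
--     for i in range(1, rows):
--         diagonals.append("".join(word_search[i + p][p] for p in range(min(rows - i, cols))))
--     # down-left diagonals (constant i + j), starting on the top row ...
--     for j in range(cols):
--         diagonals.append("".join(word_search[p][j - p] for p in range(min(rows, j + 1))))
--     # ... and on the right column (below the corner)
--     for i in range(1, rows):
--         diagonals.append("".join(word_search[i + p][cols - 1 - p] for p in range(min(rows - i, cols))))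
--
--     count = 0
--     for d in diagonals:
--         for p in range(len(d) - 3):
--             if d[p:p + 4] == sequence:
--                 count += 1
--     return count
-- ===== Notes on version B (the rewrite author's own statement) =====
-- stated objective: alternative
-- what changed: Instead of two nested index loops that build and join a 4-element list per window start, B materialises every down-right and down-left diagonal of the grid as a string (after an early 0 for grids smaller than 4x4) and counts the 4-character sliding windows of each diagonal that equal sequence.
-- outside the precondition, e.g. on count_diagonally(['abcd', 'abc', 'abcd', 'abcd'], 'aaaa'): A returns 0, B raises IndexError; on count_diagonally(['abcd', 'abcd', 'abc', 'abcd'], 'aaaa'): A returns 0, B raises IndexError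
import Mathlib
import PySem

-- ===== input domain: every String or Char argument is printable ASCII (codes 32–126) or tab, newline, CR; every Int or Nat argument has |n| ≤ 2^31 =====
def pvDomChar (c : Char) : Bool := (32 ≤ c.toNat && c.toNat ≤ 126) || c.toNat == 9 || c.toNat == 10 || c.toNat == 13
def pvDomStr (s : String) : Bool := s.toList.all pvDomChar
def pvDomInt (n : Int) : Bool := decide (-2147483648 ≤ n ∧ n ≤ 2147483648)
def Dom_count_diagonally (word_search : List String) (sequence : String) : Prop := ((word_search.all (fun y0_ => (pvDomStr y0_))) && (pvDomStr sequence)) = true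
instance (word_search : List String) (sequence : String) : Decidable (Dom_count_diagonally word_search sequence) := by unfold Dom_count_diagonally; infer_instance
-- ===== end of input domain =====

-- B replaces A's two nested window-start loops by materialising every down-right and down-left diagonal of the grid
-- and counting the 4-character sliding windows of each diagonal equal to `sequence` (alternative decomposition of the same cost).

-- ===== PORT A =====
-- word_search[i][j] : list index then string index; `none` = Python IndexError, which Pre_ excludes,
-- so the ' ' default is never read on admitted inputs.
def pyCell (word_search : List String) (i j : Int) : Char :=
  ((PySem.List.pyGet? word_search i).bind (fun row => PySem.Str.pyGet? row j)).getD ' '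

def count_diagonally (word_search : List String) (sequence : String) : Int :=
  let rows : Int := (word_search.length : Int)
  let cols : Int := PySem.Str.len ((PySem.List.pyGet? word_search 0).getD "")
  -- forward diagonals ("".join of the four 1-char strings == sequence ⇔ the 4-char list = sequence.toList)
  let count1 : Int :=
    (PySem.List.pyRange 0 (rows - 3)).foldl (fun count i =>
      (PySem.List.pyRange 0 (cols - 3)).foldl (fun count j =>
        if [pyCell word_search i j, pyCell word_search (i+1) (j+1),
            pyCell word_search (i+2) (j+2), pyCell word_search (i+3) (j+3)] = sequence.toList
        then count + 1 else count) count) 0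
  -- backward diagonals
  let count2 : Int :=
    (PySem.List.pyRange 0 (rows - 3)).foldl (fun count i =>
      (PySem.List.pyRange 3 cols).foldl (fun count j =>
        if [pyCell word_search i j, pyCell word_search (i+1) (j-1),
            pyCell word_search (i+2) (j-2), pyCell word_search (i+3) (j-3)] = sequence.toList
        then count + 1 else count) count) count1
  count2

-- ===== PORT B =====
-- diagonals are built as List Char (Python strings); d[p:p+4] == sequence via PySem.List.slice
def count_diagonally_alt (word_search : List String) (sequence : String) : Int :=
  let rows : Int := (word_search.length : Int)
  let cols : Int := PySem.Str.len ((PySem.List.pyGet? word_search 0).getD "")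
  if rows < 4 ∨ cols < 4 then 0 else  -- no 4-character diagonal window fits
  let dr1 := (PySem.List.pyRange 0 cols).map (fun j =>
    (PySem.List.pyRange 0 (min rows (cols - j))).map (fun p => pyCell word_search p (j + p)))
  let dr2 := (PySem.List.pyRange 1 rows).map (fun i =>
    (PySem.List.pyRange 0 (min (rows - i) cols)).map (fun p => pyCell word_search (i + p) p))
  let dl1 := (PySem.List.pyRange 0 cols).map (fun j =>
    (PySem.List.pyRange 0 (min rows (j + 1))).map (fun p => pyCell word_search p (j - p)))
  let dl2 := (PySem.List.pyRange 1 rows).map (fun i =>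
    (PySem.List.pyRange 0 (min (rows - i) cols)).map (fun p => pyCell word_search (i + p) (cols - 1 - p)))
  let diagonals := dr1 ++ dr2 ++ dl1 ++ dl2
  diagonals.foldl (fun count d =>
    (PySem.List.pyRange 0 ((d.length : Int) - 3)).foldl (fun count p =>
      if PySem.List.slice d (some p) (some (p + 4)) = sequence.toList then count + 1 else count) count) 0

-- ===== PRECONDITION & SPEC =====
-- Pre_ excludes the empty grid (A raises IndexError on word_search[0]) and, when the grid is at least 4x4,
-- rows shorter than the first row (cols), on which A's cell accesses can raise IndexError; this is slightly
-- conservative: on a few such ragged grids whose out-of-range cells happen never to be read A still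
-- returns 0 (see the claim's cites) — B, which walks whole diagonals, raises IndexError there.
def Pre_count_diagonally (word_search : List String) (sequence : String) : Prop :=
  word_search ≠ [] ∧
    (4 ≤ word_search.length → 4 ≤ (word_search.headD "").length →
      ∀ s ∈ word_search, (word_search.headD "").length ≤ s.length)
instance (word_search : List String) (sequence : String) : Decidable (Pre_count_diagonally word_search sequence) := by
  unfold Pre_count_diagonally; infer_instance

def pvWitness_count_diagonally : List String × String := (["ab", "cd"], "ab")

def Spec_count_diagonally (word_search : List String) (sequence : String) (out : Int) : Prop := out = count_diagonally_alt word_search sequence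
instance (word_search : List String) (sequence : String) (out : Int) : Decidable (Spec_count_diagonally word_search sequence out) := by unfold Spec_count_diagonally; infer_instance

-- ===== CLAIM (what is proved, stated in full; the proofs are below) =====
def Claim_equal_count_diagonally : Prop := ∀ (word_search : List String) (sequence : String), Dom_count_diagonally word_search sequence → Pre_count_diagonally word_search sequence → Spec_count_diagonally word_search sequence (count_diagonally word_search sequence)

-- ===== LEMMAS AND PROOFS =====

-- number of columns read by both programs: len(word_search[0])
def cdCols (ws : List String) : Nat := ((PySem.List.pyGet? ws 0).getD "").toList.length

-- the forward / backward 4-cell window predicates of A, at a start cell (i, j)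
def MF (ws : List String) (sL : List Char) (i j : Nat) : Bool :=
  decide ([pyCell ws (i : Int) (j : Int), pyCell ws ((i : Int)+1) ((j : Int)+1),
           pyCell ws ((i : Int)+2) ((j : Int)+2), pyCell ws ((i : Int)+3) ((j : Int)+3)] = sL)
def MB (ws : List String) (sL : List Char) (i j : Nat) : Bool :=
  decide ([pyCell ws (i : Int) (j : Int), pyCell ws ((i : Int)+1) ((j : Int)-1),
           pyCell ws ((i : Int)+2) ((j : Int)-2), pyCell ws ((i : Int)+3) ((j : Int)-3)] = sL)

lemma colsLen (ws : List String) :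
    PySem.Str.len ((PySem.List.pyGet? ws 0).getD "") = ((cdCols ws : Nat) : Int) := by
  simp [pysem, cdCols]

lemma pyRange_nil (a b : Int) (h : b ≤ a) : PySem.List.pyRange a b = [] := by
  refine List.eq_nil_iff_forall_not_mem.mpr ?_
  intro x hx
  rw [PySem.List.mem_pyRange_one] at hx
  omega

lemma pyRange_zero_toNat (b : Int) :
    PySem.List.pyRange 0 b = (List.range b.toNat).map (fun x : Nat => (x : Int)) := by
  rcases (by omega : b ≤ 0 ∨ 0 < b) with h | h
  · rw [pyRange_nil 0 b h]
    simp [Int.toNat_of_nonpos h]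
  · conv_lhs => rw [show b = ((b.toNat : Nat) : Int) by omega]
    rw [PySem.List.pyRange_zero_natCast]

lemma pyRange_cast (a b : Nat) :
    PySem.List.pyRange (a : Int) (b : Int) = (List.range (b - a)).map (fun x => ((a + x : Nat) : Int)) := by
  rcases (by omega : (b:Int) ≤ (a:Int) ∨ (a:Int) < (b:Int)) with h | h
  · rw [pyRange_nil _ _ h, Nat.sub_eq_zero_of_le (by exact_mod_cast h)]
    simp
  · obtain ⟨n, rfl⟩ : ∃ n, b = a + n := ⟨b - a, by omega⟩
    clear h
    induction n generalizing a with
    | zero =>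
      rw [pyRange_nil _ _ (by push_cast; omega)]
      simp
    | succ n ih =>
      rw [show ((a + (n+1) : Nat) : Int) = (((a+1) + n : Nat) : Int) by push_cast; ring]
      rw [PySem.List.pyRange_one_cons (by push_cast; omega)]
      rw [show ((a : Int) + 1) = (((a+1 : Nat)) : Int) by push_cast; ring]
      rw [ih (a+1)]
      have h1 : a + 1 + n - (a + 1) = n := by omega
      have h2 : a + (n + 1) - a = n + 1 := by omega
      rw [h1, h2, List.range_succ_eq_map]
      simp only [List.map_cons, List.map_map]
      refine congrArg₂ _ (by push_cast; ring) ?_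
      apply List.map_congr_left
      intro x _
      simp only [Function.comp_apply, Nat.succ_eq_add_one]
      push_cast
      ring

lemma pyRange_three (C : Nat) :
    PySem.List.pyRange 3 (C : Int) = (List.range (C - 3)).map (fun x => ((3 + x : Nat) : Int)) := by
  rw [show (3 : Int) = ((3 : Nat) : Int) from rfl]
  exact pyRange_cast 3 C

lemma pyRange_one' (R : Nat) :
    PySem.List.pyRange 1 (R : Int) = (List.range (R - 1)).map (fun x => ((1 + x : Nat) : Int)) := by
  rw [show (1 : Int) = ((1 : Nat) : Int) from rfl]
  exact pyRange_cast 1 R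

lemma toNat_sub_three (R : Nat) : (((R : Int)) - 3).toNat = R - 3 := by omega
lemma toNat_min_int (x y : Int) : (min x y).toNat = min x.toNat y.toNat := by omega
lemma toNat_sub_cast (R k : Nat) : ((R : Int) - (k : Int)).toNat = R - k := by omega
lemma toNat_add_one (j : Nat) : ((j : Int) + 1).toNat = j + 1 := by omega


lemma lt_min_sub_iff (p x y k : Nat) : p < min x y - k ↔ p + k < x ∧ p + k < y := by
  rcases Nat.le_total x y with h | h
  · rw [min_eq_left h]; omega
  · rw [min_eq_right h]; omega

lemma foldl_ite_prop {α : Type} (P : α → Prop) [DecidablePred P] (l : List α) (c : Int) :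
    l.foldl (fun c x => if P x then c + 1 else c) c
      = c + ((l.countP (fun x => decide (P x)) : Nat) : Int) := by
  rw [← PySem.List.foldl_count_if (fun x => decide (P x)) l c]
  exact PySem.List.foldl_congr_mem l _ _ c (by intro acc x _; simp)

lemma countP_range_sum (n : Nat) (p : Nat → Bool) :
    (List.range n).countP p = ∑ i ∈ Finset.range n, if p i then 1 else 0 := by
  induction n with
  | zero => simp
  | succ n ih =>
    rw [List.range_succ, List.countP_append, Finset.sum_range_succ, ih]
    simp [List.countP_cons]

lemma sum_map_range (n : Nat) (g : Nat → Int) :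
    ((List.range n).map g).sum = ∑ i ∈ Finset.range n, g i := by
  induction n with
  | zero => simp
  | succ n ih =>
    rw [List.range_succ, List.map_append, List.sum_append, Finset.sum_range_succ, ih]
    simp

-- a 4-char window of a diagonal (a map over `range`) is the list of its four cells
lemma slice_window {α : Type} (g : Nat → α) (m p : Nat) (h : p + 4 ≤ m) :
    PySem.List.slice ((List.range m).map g) (some (p : Int)) (some ((p : Int) + 4))
      = [g p, g (p+1), g (p+2), g (p+3)] := by
  rw [show ((p : Int) + 4) = ((p + 4 : Nat) : Int) by push_cast; ring, PySem.List.slice_natCast]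
  rw [show p + 4 - p = 4 from by omega]
  apply List.ext_getElem
  · simp
    omega
  · intro i h1 h2
    simp only [List.getElem_take, List.getElem_drop, List.getElem_map, List.getElem_range]
    simp at h2
    interval_cases i <;> simp

-- the core reindexing: summing 4-windows over all down-right diagonals = summing over all window start cells
lemma diag_core (R C : Nat) (M : Nat → Nat → Bool) :
    ((∑ j ∈ Finset.range C, ∑ p ∈ Finset.range (min R (C - j) - 3), if M p (j + p) then 1 else 0)
      + ∑ i ∈ Finset.range (R - 1), ∑ p ∈ Finset.range (min (R - (1+i)) C - 3), if M (1+i+p) p then 1 else 0)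
    = ∑ i ∈ Finset.range (R - 3), ∑ j ∈ Finset.range (C - 3), if M i j then 1 else 0 := by
  classical
  rw [← Finset.sum_product' (Finset.range (R-3)) (Finset.range (C-3)) (fun i j => if M i j then 1 else 0)]
  rw [← Finset.sum_filter_add_sum_filter_not (Finset.range (R-3) ×ˢ Finset.range (C-3))
        (fun x => x.1 ≤ x.2) (fun x => if M x.1 x.2 then 1 else 0)]
  congr 1
  · rw [Finset.sum_sigma' (Finset.range C) (fun j => Finset.range (min R (C - j) - 3))
        (fun j p => if M p (j + p) then 1 else 0)]
    refine Finset.sum_nbij' (i := fun x => (x.2, x.1 + x.2)) (j := fun x => ⟨x.2 - x.1, x.1⟩)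
      ?_ ?_ ?_ ?_ ?_
    · rintro ⟨j, p⟩ ha
      simp only [Finset.mem_sigma, Finset.mem_range, lt_min_sub_iff] at ha
      simp only [Finset.mem_filter, Finset.mem_product, Finset.mem_range]
      omega
    · rintro ⟨i, j⟩ ha
      simp only [Finset.mem_filter, Finset.mem_product, Finset.mem_range] at ha
      simp only [Finset.mem_sigma, Finset.mem_range, lt_min_sub_iff]
      omega
    · rintro ⟨j, p⟩ ha
      simp only [Finset.mem_sigma, Finset.mem_range] at ha
      dsimp only
      rw [Sigma.mk.injEq]
      refine ⟨by omega, by rfl⟩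
    · rintro ⟨i, j⟩ ha
      simp only [Finset.mem_filter, Finset.mem_product, Finset.mem_range] at ha
      dsimp only
      rw [Prod.mk.injEq]
      exact ⟨by omega, by omega⟩
    · rintro ⟨j, p⟩ _
      rfl
  · rw [Finset.sum_sigma' (Finset.range (R - 1)) (fun i => Finset.range (min (R - (1+i)) C - 3))
        (fun i p => if M (1+i+p) p then 1 else 0)]
    refine Finset.sum_nbij' (i := fun x => (1 + x.1 + x.2, x.2)) (j := fun x => ⟨x.1 - x.2 - 1, x.2⟩)
      ?_ ?_ ?_ ?_ ?_
    · rintro ⟨i, p⟩ ha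
      simp only [Finset.mem_sigma, Finset.mem_range, lt_min_sub_iff] at ha
      simp only [Finset.mem_filter, Finset.mem_product, Finset.mem_range]
      omega
    · rintro ⟨i, j⟩ ha
      simp only [Finset.mem_filter, Finset.mem_product, Finset.mem_range] at ha
      simp only [Finset.mem_sigma, Finset.mem_range, lt_min_sub_iff]
      omega
    · rintro ⟨i, p⟩ ha
      simp only [Finset.mem_sigma, Finset.mem_range] at ha
      dsimp only
      rw [Sigma.mk.injEq]
      refine ⟨by omega, by rfl⟩
    · rintro ⟨i, j⟩ ha
      simp only [Finset.mem_filter, Finset.mem_product, Finset.mem_range] at ha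
      dsimp only
      rw [Prod.mk.injEq]
      exact ⟨by omega, by omega⟩
    · rintro ⟨i, p⟩ _
      rfl

lemma portA (ws : List String) (seq : String) :
    count_diagonally ws seq
      = ((∑ i ∈ Finset.range (ws.length - 3), ∑ j ∈ Finset.range (cdCols ws - 3),
            if MF ws seq.toList i j then 1 else 0 : Nat) : Int)
        + ((∑ i ∈ Finset.range (ws.length - 3), ∑ t ∈ Finset.range (cdCols ws - 3),
            if MB ws seq.toList i (3 + t) then 1 else 0 : Nat) : Int) := by
  simp only [count_diagonally, colsLen, MF, MB]
  simp only [pyRange_zero_toNat, pyRange_three, toNat_sub_three]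
  simp only [List.foldl_map]
  simp only [foldl_ite_prop]
  simp only [PySem.List.foldl_add]
  simp only [sum_map_range, countP_range_sum, zero_add]
  push_cast
  ring_nf

lemma portB (ws : List String) (seq : String) :
    count_diagonally_alt ws seq
      = if (ws.length : Int) < 4 ∨ ((cdCols ws : Nat) : Int) < 4 then 0 else
        ((∑ j ∈ Finset.range (cdCols ws), ∑ p ∈ Finset.range (min ws.length (cdCols ws - j) - 3),
            if MF ws seq.toList p (j + p) then 1 else 0 : Nat) : Int)
        + ((∑ i ∈ Finset.range (ws.length - 1), ∑ p ∈ Finset.range (min (ws.length - (1+i)) (cdCols ws) - 3),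
            if MF ws seq.toList (1+i+p) p then 1 else 0 : Nat) : Int)
        + ((∑ j ∈ Finset.range (cdCols ws), ∑ p ∈ Finset.range (min ws.length (j + 1) - 3),
            if MB ws seq.toList p (j - p) then 1 else 0 : Nat) : Int)
        + ((∑ i ∈ Finset.range (ws.length - 1), ∑ p ∈ Finset.range (min (ws.length - (1+i)) (cdCols ws) - 3),
            if MB ws seq.toList (1+i+p) (cdCols ws - 1 - p) then 1 else 0 : Nat) : Int) := by
  simp only [count_diagonally_alt, colsLen, MF, MB]
  split_ifs with hs
  · rfl
  simp only [pyRange_zero_toNat, pyRange_one', List.foldl_append, List.map_map, List.foldl_map,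
    Function.comp_def, List.length_map, List.length_range, toNat_min_int, toNat_sub_cast,
    toNat_add_one, toNat_sub_three, Int.toNat_natCast]
  simp only [foldl_ite_prop]
  simp only [PySem.List.foldl_add]
  simp only [sum_map_range, countP_range_sum, zero_add]
  push_cast
  refine congrArg₂ (· + ·) (congrArg₂ (· + ·) (congrArg₂ (· + ·) ?_ ?_) ?_) ?_
  · refine Finset.sum_congr rfl ?_
    intro j hj
    refine Finset.sum_congr rfl ?_
    intro p hp
    simp only [Finset.mem_range, lt_min_sub_iff] at hj hp
    rw [slice_window _ _ _ (by omega)]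
    push_cast
    ring_nf
  · refine Finset.sum_congr rfl ?_
    intro i hi
    refine Finset.sum_congr rfl ?_
    intro p hp
    simp only [Finset.mem_range, lt_min_sub_iff] at hi hp
    rw [slice_window _ _ _ (by omega)]
    push_cast
    ring_nf
  · refine Finset.sum_congr rfl ?_
    intro j hj
    refine Finset.sum_congr rfl ?_
    intro p hp
    simp only [Finset.mem_range, lt_min_sub_iff] at hj hp
    rw [slice_window _ _ _ (by omega)]
    rw [show ((j - p : Nat) : Int) = (j : Int) - (p : Int) from by omega]
    push_cast
    ring_nf
  · refine Finset.sum_congr rfl ?_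
    intro i hi
    refine Finset.sum_congr rfl ?_
    intro p hp
    simp only [Finset.mem_range, lt_min_sub_iff] at hi hp
    rw [slice_window _ _ _ (by omega)]
    rw [show ((cdCols ws - 1 - p : Nat) : Int) = (cdCols ws : Int) - 1 - (p : Int) from by omega]
    push_cast
    ring_nf

theorem count_diagonally_spec : Claim_equal_count_diagonally := by
  unfold Claim_equal_count_diagonally
  intro ws seq _ _
  unfold Spec_count_diagonally
  rw [portA, portB]
  by_cases hs : (ws.length : Int) < 4 ∨ ((cdCols ws : Nat) : Int) < 4
  · rw [if_pos hs]
    have h0 : ws.length - 3 = 0 ∨ cdCols ws - 3 = 0 := by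
      rcases hs with hs | hs <;> [left; right] <;> omega
    rcases h0 with h0 | h0 <;> simp [h0]
  rw [if_neg hs]
  have hf := diag_core ws.length (cdCols ws) (MF ws seq.toList)
  have hb := diag_core ws.length (cdCols ws) (fun i t => MB ws seq.toList i (cdCols ws - 1 - t))
  beta_reduce at hb
  have h3 : (∑ j ∈ Finset.range (cdCols ws), ∑ p ∈ Finset.range (min ws.length (j + 1) - 3),
              if MB ws seq.toList p (j - p) then 1 else 0)
          = (∑ j ∈ Finset.range (cdCols ws), ∑ p ∈ Finset.range (min ws.length (cdCols ws - j) - 3),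
              if MB ws seq.toList p (cdCols ws - 1 - (j + p)) then 1 else 0) := by
    rw [← Finset.sum_range_reflect (fun j => ∑ p ∈ Finset.range (min ws.length (cdCols ws - j) - 3),
          if MB ws seq.toList p (cdCols ws - 1 - (j + p)) then 1 else 0) (cdCols ws)]
    refine Finset.sum_congr rfl ?_
    intro j hj
    simp only [Finset.mem_range] at hj
    rw [show cdCols ws - (cdCols ws - 1 - j) = j + 1 from by omega]
    refine Finset.sum_congr rfl ?_
    intro p hp
    simp only [Finset.mem_range, lt_min_sub_iff] at hp
    rw [show cdCols ws - 1 - (cdCols ws - 1 - j + p) = j - p from by omega]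
  have h5 : (∑ i ∈ Finset.range (ws.length - 3), ∑ j ∈ Finset.range (cdCols ws - 3),
              if MB ws seq.toList i (cdCols ws - 1 - j) then 1 else 0)
          = (∑ i ∈ Finset.range (ws.length - 3), ∑ t ∈ Finset.range (cdCols ws - 3),
              if MB ws seq.toList i (3 + t) then 1 else 0) := by
    refine Finset.sum_congr rfl ?_
    intro i _
    rw [← Finset.sum_range_reflect (fun t => if MB ws seq.toList i (3 + t) then 1 else 0)
          (cdCols ws - 3)]
    refine Finset.sum_congr rfl ?_
    intro j hj
    simp only [Finset.mem_range] at hj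
    rw [show 3 + (cdCols ws - 3 - 1 - j) = cdCols ws - 1 - j from by omega]
  rw [h3]
  rw [← hf, ← (hb.trans h5)]
  push_cast
  ring
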